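-- pv_equiv track=rewrite | github.com/opensanctions/opensanctions | datasets/us/cia_world_leaders/crawler.py | clean_position
-- ===== SOURCE A (Python) =====
-- def clean_position(position: str) -> str:
--     replacements = [
--         ("Dep.", "Deputy"),
--         ("Min.", "Minister"),
--         ("Pres.", "President"),
--         ("Gen.", "General"),
--         ("Govt.", "Government"),
--         ("Sec.", "Secretary"),
--         ("Dir.", "Director"),
--         ("Chmn.", "Chairman"),
--         ("Intl.", "International"),
--         ("Mbr.", "Member"),
--     ]
--     for abbrev, full in replacements:
--         position = position.replace(abbrev, full)
--     return position
-- ===== SOURCE B (Python) =====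
-- def clean_position(position: str) -> str:
--     table = {
--         "Dep.": "Deputy",
--         "Min.": "Minister",
--         "Pres.": "President",
--         "Gen.": "General",
--         "Govt.": "Government",
--         "Sec.": "Secretary",
--         "Dir.": "Director",
--         "Chmn.": "Chairman",
--         "Intl.": "International",
--         "Mbr.": "Member",
--     }
--     out = []
--     i = 0
--     n = len(position)
--     while i < n:
--         for abbrev, full in table.items():
--             if position.startswith(abbrev, i):
--                 out.append(full)
--                 i += len(abbrev)
--                 break
--         else:
--             out.append(position[i])
--             i += 1
--     return "".join(out)
-- ===== Notes on version B (the rewrite author's own statement) =====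
-- stated objective: alternative
-- what changed: A makes ten sequential full-string str.replace passes (one per abbreviation); B builds one abbreviation->expansion table and does a single left-to-right scan over the string, substituting the matching abbreviation at each position.
import Mathlib
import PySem

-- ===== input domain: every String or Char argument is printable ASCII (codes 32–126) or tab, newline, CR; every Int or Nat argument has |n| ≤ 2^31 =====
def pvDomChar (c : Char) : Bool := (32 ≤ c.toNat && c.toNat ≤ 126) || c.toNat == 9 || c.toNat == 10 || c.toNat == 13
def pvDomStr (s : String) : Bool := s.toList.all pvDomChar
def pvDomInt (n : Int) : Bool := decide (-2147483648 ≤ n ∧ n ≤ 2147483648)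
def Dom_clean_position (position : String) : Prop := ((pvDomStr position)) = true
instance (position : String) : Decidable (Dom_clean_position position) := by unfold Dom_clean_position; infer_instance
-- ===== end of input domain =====

-- B replaces A's ten sequential full-string replace passes by one left-to-right scan
-- that substitutes the matching abbreviation at each position (objective: alternative;
-- same result because no abbreviation overlaps another and no expansion re-creates one).

-- ===== PORT A =====
def clean_position (position : String) : String :=
  let replacements : List (String × String) :=
    [("Dep.", "Deputy"), ("Min.", "Minister"), ("Pres.", "President"),
     ("Gen.", "General"), ("Govt.", "Government"), ("Sec.", "Secretary"),
     ("Dir.", "Director"), ("Chmn.", "Chairman"), ("Intl.", "International"),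
     ("Mbr.", "Member")]
  replacements.foldl (fun pos p => PySem.Str.replace pos p.1 p.2) position

-- ===== PORT B =====
-- the dict of Source B as an association list (distinct literal keys, insertion order)
def cpTable : List (String × String) :=
  [("Dep.", "Deputy"), ("Min.", "Minister"), ("Pres.", "President"),
   ("Gen.", "General"), ("Govt.", "Government"), ("Sec.", "Secretary"),
   ("Dir.", "Director"), ("Chmn.", "Chairman"), ("Intl.", "International"),
   ("Mbr.", "Member")]

-- Source B's while loop: at each position, first table entry whose key starts here
-- (startswith) emits its expansion and skips the key, otherwise copy one char.
def cpScan : List Char → List Char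
  | [] => []
  | c :: t =>
    match cpTable.find? (fun p => p.1.toList.isPrefixOf (c :: t)) with
    | some p => p.2.toList ++ cpScan (t.drop (p.1.toList.length - 1))
    | none => c :: cpScan t
termination_by s => s.length
decreasing_by
  · simp only [List.length_cons, List.length_drop]; omega
  · simp

def clean_position_alt (position : String) : String :=
  String.ofList (cpScan position.toList)

-- ===== PRECONDITION & SPEC =====
def Spec_clean_position (position : String) (out : String) : Prop := out = clean_position_alt position
instance (position : String) (out : String) : Decidable (Spec_clean_position position out) := by unfold Spec_clean_position; infer_instance

-- ===== CLAIM (what is proved, stated in full; the proofs are below) =====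
def Claim_equal_clean_position : Prop := ∀ (position : String), Dom_clean_position position → Spec_clean_position position (clean_position position)

-- ===== LEMMAS AND PROOFS =====

-- `canMatch a u` decides whether `a` can be a prefix of `u ++ x` for SOME continuation x
def canMatch (a u : List Char) : Bool :=
  if a.length ≤ u.length then a.isPrefixOf u else u.isPrefixOf a

-- single-key leftmost replacement, the structural form of Python str.replace
def rep1 (old new : List Char) : List Char → List Char
  | [] => []
  | c :: t =>
    if old.isPrefixOf (c :: t) then new ++ rep1 old new (t.drop (old.length - 1))
    else c :: rep1 old new t
termination_by s => s.length
decreasing_by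
  · simp only [List.length_cons, List.length_drop]; omega
  · simp

-- cpScan generalized over the table
def scanW (tt : List (List Char × List Char)) : List Char → List Char
  | [] => []
  | c :: t =>
    match tt.find? (fun p => p.1.isPrefixOf (c :: t)) with
    | some p => p.2 ++ scanW tt (t.drop (p.1.length - 1))
    | none => c :: scanW tt t
termination_by s => s.length
decreasing_by
  · simp only [List.length_cons, List.length_drop]; omega
  · simp

def seqRep (tt : List (List Char × List Char)) (s : List Char) : List Char :=
  tt.foldl (fun s p => rep1 p.1 p.2 s) s

def cpTableL : List (List Char × List Char) := cpTable.map (fun p => (p.1.toList, p.2.toList))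

-- the non-interference facts about a table that make one simultaneous pass equal sequential passes
def GoodT (tt : List (List Char × List Char)) : Prop :=
  (∀ p ∈ tt, p.1 ≠ []) ∧
  (∀ p ∈ tt, ∀ q ∈ tt, p.1 ≠ q.1 → canMatch p.1 q.1 = false) ∧
  (∀ p ∈ tt, ∀ q ∈ tt, ∀ j < q.1.length, 1 ≤ j → canMatch p.1 (q.1.drop j) = false) ∧
  (∀ p ∈ tt, ∀ q ∈ tt, ∀ j < q.2.length, canMatch p.1 (q.2.drop j) = false) ∧
  (∀ p ∈ tt, ∀ q ∈ tt, ∀ m < p.1.length, 1 ≤ m → canMatch (p.1.drop m) q.2 = false) ∧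
  (∀ p ∈ tt, ∀ q ∈ tt, ∀ m < p.1.length, 1 ≤ m → canMatch (p.1.drop m) q.1 = false) ∧
  (tt.map Prod.fst).Nodup

theorem good_cpTableL : GoodT cpTableL := by
  unfold GoodT cpTableL cpTable canMatch
  decide

theorem prefix_take {a b c : List Char} (h : a <+: b ++ c) (hl : a.length ≤ b.length) :
    a <+: b := by
  have := List.prefix_iff_eq_take.mp h
  rw [List.take_append_of_le_length hl] at this
  exact this ▸ List.take_prefix _ _

theorem prefix_drop {a b c : List Char} (h : a <+: b ++ c) (hl : b.length ≤ a.length) :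
    a.drop b.length <+: c := by
  have hb : b <+: a := List.prefix_of_prefix_length_le (b.prefix_append c) h hl
  obtain ⟨d, hd⟩ := hb
  obtain ⟨t, ht⟩ := h
  subst hd
  rw [List.append_assoc] at ht
  have hdc : d ++ t = c := List.append_cancel_left ht
  simpa [List.drop_append] using ⟨t, hdc⟩

theorem canMatch_iff (a u : List Char) : canMatch a u = true ↔ ∃ x, a <+: u ++ x := by
  unfold canMatch
  split
  · rename_i hl
    simp only [List.isPrefixOf_iff_prefix]
    constructor
    · exact fun h => ⟨[], h.trans (by simp)⟩
    · exact fun ⟨x, hx⟩ => prefix_take hx hl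
  · rename_i hl
    simp only [List.isPrefixOf_iff_prefix]
    constructor
    · rintro ⟨d, rfl⟩
      exact ⟨d, List.prefix_rfl⟩
    · rintro ⟨x, hx⟩
      exact List.prefix_of_prefix_length_le (u.prefix_append x) hx (by omega)

theorem replace_go_spec (old new : List Char) (h : old ≠ []) :
    ∀ fuel s acc, s.length ≤ fuel →
      PySem.Chars.replace.go old new fuel s acc = acc.reverse ++ rep1 old new s := by
  have hlen : 1 ≤ old.length := List.length_pos_iff.mpr h
  intro fuel
  induction fuel with
  | zero =>
    intro s acc hs
    have : s = [] := List.eq_nil_of_length_eq_zero (by omega)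
    subst this
    rw [PySem.Chars.replace.go, rep1]
  | succ fuel ih =>
    intro s acc hs
    match s with
    | [] => rw [PySem.Chars.replace.go, rep1] <;> simp
    | c :: t =>
      rw [PySem.Chars.replace.go, rep1]
      split
      · have hdrop : (c :: t).drop old.length = t.drop (old.length - 1) := by
          conv_lhs => rw [show old.length = (old.length - 1) + 1 by omega]
          simp
        rw [hdrop, ih _ _ (by simp at hs ⊢; omega)]
        simp
      · rw [ih _ _ (by simp at hs ⊢; omega)]
        simp

theorem replace_eq_rep1 (s old new : List Char) (h : old ≠ []) :
    PySem.Chars.replace s old new = rep1 old new s := by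
  rw [PySem.Chars.replace]
  simp only [List.isEmpty_iff]
  rw [if_neg h, replace_go_spec old new h s.length s [] le_rfl]
  simp

theorem cpScan_eq_scanW (s : List Char) : cpScan s = scanW cpTableL s := by
  induction s using cpScan.induct with
  | case1 => rw [cpScan, scanW]
  | case2 c t p hfind ih =>
    unfold cpTableL at ih ⊢
    rw [cpScan, scanW, hfind, List.find?_map]
    simp only [Function.comp_def]
    rw [hfind]
    simpa using ih
  | case3 c t hfind ih =>
    unfold cpTableL at ih ⊢
    rw [cpScan, scanW, hfind, List.find?_map]
    simp only [Function.comp_def]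
    rw [hfind]
    simpa using ih

theorem scanW_nil_table (s : List Char) : scanW [] s = s := by
  induction s with
  | nil => rw [scanW]
  | cons c t ih => rw [scanW]; simp [ih]

theorem scanW_skip (tt : List (List Char × List Char)) (u x : List Char)
    (h : ∀ j < u.length, ∀ p ∈ tt, ¬ p.1 <+: (u.drop j ++ x)) :
    scanW tt (u ++ x) = u ++ scanW tt x := by
  induction u with
  | nil => simp
  | cons c u' ih =>
    have h0 := h 0 (by simp)
    simp only [List.drop_zero] at h0
    have hnone : tt.find? (fun p => p.1.isPrefixOf (c :: (u' ++ x))) = none := by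
      rw [List.find?_eq_none]
      intro p hp
      simp only [List.isPrefixOf_iff_prefix]
      simpa using h0 p hp
    rw [List.cons_append, scanW, hnone]
    rw [ih (fun j hj p hp => by simpa using h (j + 1) (by simpa using hj) p hp)]
    simp

theorem rep1_skip (k v u x : List Char)
    (h : ∀ j < u.length, ¬ k <+: (u.drop j ++ x)) :
    rep1 k v (u ++ x) = u ++ rep1 k v x := by
  induction u with
  | nil => simp
  | cons c u' ih =>
    have h0 := h 0 (by simp)
    simp only [List.drop_zero] at h0
    rw [List.cons_append, rep1, if_neg (by
      simp only [List.isPrefixOf_iff_prefix]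
      simpa using h0)]
    rw [ih (fun j hj => by simpa using h (j + 1) (by simpa using hj))]
    simp

theorem scanW_match (ts1 ts2 : List (List Char × List Char)) (k v : List Char) (x : List Char)
    (hk : k ≠ []) (h1 : ∀ p ∈ ts1, ¬ p.1 <+: (k ++ x)) :
    scanW (ts1 ++ (k, v) :: ts2) (k ++ x) = v ++ scanW (ts1 ++ (k, v) :: ts2) x := by
  match k, hk with
  | c :: k', _ =>
    rw [List.cons_append, scanW]
    have hfind : (ts1 ++ ((c :: k', v) :: ts2)).find?
        (fun p => p.1.isPrefixOf (c :: (k' ++ x))) = some (c :: k', v) := by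
      rw [List.find?_append]
      have hn : ts1.find? (fun p => p.1.isPrefixOf (c :: (k' ++ x))) = none := by
        rw [List.find?_eq_none]
        intro p hp
        simp only [List.isPrefixOf_iff_prefix]
        simpa using h1 p hp
      rw [hn]
      have hp : (c :: k').isPrefixOf (c :: (k' ++ x)) = true := by
        simp [List.isPrefixOf_iff_prefix]
      simp [List.find?, hp]
    rw [hfind]
    simp

theorem rep1_head (k v r : List Char) (hk : k ≠ []) :
    rep1 k v (k ++ r) = v ++ rep1 k v r := by
  match k, hk with
  | c :: k', _ =>
    rw [List.cons_append, rep1, if_pos (by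
      simp [List.isPrefixOf_iff_prefix])]
    simp

theorem GoodT_cons {p : List Char × List Char} {tt : List (List Char × List Char)}
    (h : GoodT (p :: tt)) : GoodT tt := by
  obtain ⟨h1, h2, h3, h4, h5, h6, h7⟩ := h
  exact ⟨fun q hq => h1 q (List.mem_cons_of_mem _ hq),
    fun a ha b hb => h2 a (List.mem_cons_of_mem _ ha) b (List.mem_cons_of_mem _ hb),
    fun a ha b hb => h3 a (List.mem_cons_of_mem _ ha) b (List.mem_cons_of_mem _ hb),
    fun a ha b hb => h4 a (List.mem_cons_of_mem _ ha) b (List.mem_cons_of_mem _ hb),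
    fun a ha b hb => h5 a (List.mem_cons_of_mem _ ha) b (List.mem_cons_of_mem _ hb),
    fun a ha b hb => h6 a (List.mem_cons_of_mem _ ha) b (List.mem_cons_of_mem _ hb),
    (by simpa using h7.of_cons)⟩

theorem rep1_nil (k v : List Char) : rep1 k v [] = [] := by rw [rep1]

theorem scanW_nil (tt : List (List Char × List Char)) : scanW tt [] = [] := by rw [scanW]

theorem prefix_extend {a b x : List Char} (h : a <+: b) : a <+: b ++ x :=
  h.trans (b.prefix_append x)

theorem step (k v : List Char) (ts : List (List Char × List Char))
    (hg : GoodT ((k, v) :: ts)) :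
    ∀ s, scanW ts (rep1 k v s) = scanW ((k, v) :: ts) s := by
  obtain ⟨hg1, hg2, hg3, hg4, hg5, hg6, hg7⟩ := hg
  have hkne : k ≠ [] := hg1 (k, v) List.mem_cons_self
  have hk1 : 1 ≤ k.length := List.length_pos_iff.mpr hkne
  suffices H : ∀ n (s : List Char), s.length ≤ n →
      scanW ts (rep1 k v s) = scanW ((k, v) :: ts) s by
    exact fun s => H s.length s le_rfl
  intro n
  induction n with
  | zero =>
    intro s hs
    have : s = [] := List.eq_nil_of_length_eq_zero (by omega)
    subst this
    rw [rep1_nil, scanW_nil, scanW_nil]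
  | succ n ih =>
    intro s hs
    by_cases hA : ∃ j, ∃ p ∈ (k, v) :: ts, p.1 <+: s.drop j
    · -- some key matches somewhere; find the leftmost match position p₀
      set p₀ := Nat.find hA with hp₀
      obtain ⟨⟨k', v'⟩, hmem, hpre⟩ := Nat.find_spec hA
      have hmin : ∀ j < p₀, ∀ p ∈ (k, v) :: ts, ¬ p.1 <+: s.drop j :=
        fun j hj p hp hc => Nat.find_min hA hj ⟨p, hp, hc⟩
      have hk'ne : k' ≠ [] := hg1 (k', v') hmem
      have hp₀lt : p₀ < s.length := by
        by_contra hcon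
        have hnil : s.drop p₀ = [] := List.drop_eq_nil_of_le (by omega)
        rw [hnil] at hpre
        exact hk'ne (List.prefix_nil.mp hpre)
      set u := s.take p₀ with hu
      have hulen : u.length = p₀ := by
        rw [hu, List.length_take]; omega
      have hdropj : ∀ j ≤ p₀, s.drop j = u.drop j ++ s.drop p₀ := by
        intro j hj
        conv_lhs => rw [← List.take_append_drop p₀ s]
        rw [List.drop_append, ← hu]
        have : j - u.length = 0 := by omega
        rw [this, List.drop_zero]
      by_cases hHead : k <+: s.drop p₀
      · -- B1: the head key k itself matches at p₀
        obtain ⟨r, hr⟩ := hHead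
        have hs_eq : s = u ++ (k ++ r) := by
          rw [hr, hu, List.take_append_drop]
        have hrlen : r.length ≤ n := by
          have : s.length = u.length + (k.length + r.length) := by rw [hs_eq]; simp
          omega
        have hrep : rep1 k v s = u ++ (v ++ rep1 k v r) := by
          rw [hs_eq, rep1_skip k v u (k ++ r) (fun j hj hc => by
            rw [hr, ← hdropj j (by omega)] at hc
            exact hmin j (by omega) (k, v) List.mem_cons_self hc), rep1_head k v r hkne]
        have hblk : ∀ j < (u ++ v).length, ∀ p ∈ ts,
            ¬ p.1 <+: ((u ++ v).drop j ++ rep1 k v r) := by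
          intro j hj p hp hc
          rcases Nat.lt_or_ge j u.length with hju | hjv
          · have hdr : (u ++ v).drop j = u.drop j ++ v := by
              rw [List.drop_append]
              have : j - u.length = 0 := by omega
              rw [this, List.drop_zero]
            rw [hdr, List.append_assoc] at hc
            by_cases h1 : p.1.length ≤ (u.drop j).length
            · have hpu := prefix_take hc h1
              refine hmin j (by omega) p (List.mem_cons_of_mem _ hp) ?_
              rw [hdropj j (by omega)]
              exact prefix_extend hpu
            · have h2 := prefix_drop hc (by omega)
              have hm : (u.drop j).length = p₀ - j := by
                simp [List.length_drop]; omega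
              have hcm : canMatch (p.1.drop ((u.drop j).length)) v = true :=
                (canMatch_iff _ _).mpr ⟨rep1 k v r, h2⟩
              have hfalse := hg5 p (List.mem_cons_of_mem _ hp) (k, v) List.mem_cons_self
                ((u.drop j).length) (by omega) (by omega)
              simp only at hfalse
              rw [hfalse] at hcm
              exact Bool.false_ne_true hcm
          · have hdr : (u ++ v).drop j = v.drop (j - u.length) := by
              rw [List.drop_append, List.drop_eq_nil_of_le hjv, List.nil_append]
            rw [hdr] at hc
            have hcm : canMatch p.1 (v.drop (j - u.length)) = true :=
              (canMatch_iff _ _).mpr ⟨rep1 k v r, hc⟩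
            have hfalse := hg4 p (List.mem_cons_of_mem _ hp) (k, v) List.mem_cons_self
              (j - u.length) (by
                show j - u.length < v.length
                simp only [List.length_append] at hj; omega)
            rw [hfalse] at hcm
            exact Bool.false_ne_true hcm
        rw [hrep, ← List.append_assoc, scanW_skip ts (u ++ v) _ hblk,
          ih r hrlen, hs_eq,
          scanW_skip ((k, v) :: ts) u (k ++ r) (fun j hj p hp hc => by
            rw [hr, ← hdropj j (by omega)] at hc
            exact hmin j (by omega) p hp hc)]
        have hm := scanW_match [] ts k v r hkne (by simp)
        rw [List.nil_append] at hm
        rw [hm]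
        simp
      · -- B2: a key k' ≠ k from ts matches at p₀
        have hk'k : k' ≠ k := by
          rintro rfl
          exact hHead hpre
        have hmem_ts : (k', v') ∈ ts := by
          rcases List.mem_cons.mp hmem with heq | h
          · exact absurd (congrArg Prod.fst heq) hk'k
          · exact h
        obtain ⟨ts1, ts2, hts⟩ := List.append_of_mem hmem_ts
        obtain ⟨r, hr⟩ := hpre
        replace hr : k' ++ r = s.drop p₀ := hr
        have hs_eq : s = u ++ (k' ++ r) := by
          rw [hr, hu, List.take_append_drop]
        have hk'1 : 1 ≤ k'.length := List.length_pos_iff.mpr hk'ne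
        have hrlen : r.length ≤ n := by
          have : s.length = u.length + (k'.length + r.length) := by rw [hs_eq]; simp
          omega
        -- rep1 k v does not touch u ++ k'
        have hrep : rep1 k v s = u ++ (k' ++ rep1 k v r) := by
          rw [hs_eq, ← List.append_assoc]
          rw [rep1_skip k v (u ++ k') r (fun j hj hc => by
            simp only [List.length_append] at hj
            rcases Nat.lt_or_ge j u.length with hju | hjk
            · rw [List.drop_append] at hc
              have h0 : j - u.length = 0 := by omega
              rw [h0, List.drop_zero, List.append_assoc, hr, ← hdropj j (by omega)] at hc
              exact hmin j (by omega) (k, v) List.mem_cons_self hc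
            · rw [List.drop_append, List.drop_eq_nil_of_le hjk, List.nil_append] at hc
              by_cases hi : j - u.length = 0
              · rw [hi, List.drop_zero, hr] at hc
                exact hHead hc
              · have hcm : canMatch k (k'.drop (j - u.length)) = true :=
                  (canMatch_iff _ _).mpr ⟨r, hc⟩
                have hfalse := hg3 (k, v) List.mem_cons_self (k', v') hmem
                  (j - u.length) (by show j - u.length < k'.length; omega) (by omega)
                simp only at hfalse
                rw [hfalse] at hcm
                exact Bool.false_ne_true hcm), List.append_assoc]
        -- no key of ts matches inside the prefix segment before a suffix starting with k'
        have hts1 : ∀ (X : List Char), ∀ p ∈ ts1, ¬ p.1 <+: k' ++ X := by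
          intro X p hp hc
          have hpts : p ∈ ts := by rw [hts]; exact List.mem_append_left _ hp
          by_cases h1 : p.1.length ≤ k'.length
          · have hpk := prefix_take hc h1
            by_cases heq : p.1 = k'
            · -- duplicate key, contradicts Nodup
              have hnd : (ts.map Prod.fst).Nodup := by simpa using hg7.of_cons
              rw [hts, List.map_append] at hnd
              have hdisj := List.disjoint_of_nodup_append hnd
              have h1m : k' ∈ ts1.map Prod.fst := by
                rw [← heq]
                exact List.mem_map_of_mem hp
              exact hdisj h1m (by simp)
            · have hcm : canMatch p.1 k' = true := by
                unfold canMatch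
                rw [if_pos h1]
                exact List.isPrefixOf_iff_prefix.mpr hpk
              have hfalse := hg2 p (List.mem_cons_of_mem _ hpts) (k', v') hmem heq
              rw [hfalse] at hcm
              exact Bool.false_ne_true hcm
          · have hk'p : k' <+: p.1 :=
              List.prefix_of_prefix_length_le (k'.prefix_append X) hc (by omega)
            have hcm : canMatch p.1 k' = true := by
              unfold canMatch
              rw [if_neg h1]
              exact List.isPrefixOf_iff_prefix.mpr hk'p
            have hfalse := hg2 p (List.mem_cons_of_mem _ hpts) (k', v') hmem
              (fun he => h1 (le_of_eq (congrArg List.length he)))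
            rw [hfalse] at hcm
            exact Bool.false_ne_true hcm
        -- LHS: skip u, then the (k', v') entry of ts fires
        have hblk : ∀ j < u.length, ∀ p ∈ ts,
            ¬ p.1 <+: (u.drop j ++ (k' ++ rep1 k v r)) := by
          intro j hj p hp hc
          by_cases h1 : p.1.length ≤ (u.drop j).length
          · have hpu := prefix_take hc h1
            refine hmin j (by omega) p (List.mem_cons_of_mem _ hp) ?_
            rw [hdropj j (by omega)]
            exact prefix_extend hpu
          · have h2 := prefix_drop hc (by omega)
            have hm : (u.drop j).length = p₀ - j := by
              simp [List.length_drop]; omega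
            have hcm : canMatch (p.1.drop ((u.drop j).length)) k' = true :=
              (canMatch_iff _ _).mpr ⟨rep1 k v r, h2⟩
            have hfalse := hg6 p (List.mem_cons_of_mem _ hp) (k', v') hmem
              ((u.drop j).length) (by omega) (by omega)
            simp only at hfalse
            rw [hfalse] at hcm
            exact Bool.false_ne_true hcm
        have hmatchL : scanW ts (k' ++ rep1 k v r) = v' ++ scanW ts (rep1 k v r) := by
          rw [hts]
          exact scanW_match ts1 ts2 k' v' _ hk'ne (hts1 _)
        -- RHS: skip u, then (k', v') fires in (k, v) :: ts as well
        have hmatchR : scanW ((k, v) :: ts) (k' ++ r) = v' ++ scanW ((k, v) :: ts) r := by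
          have hcons : (k, v) :: ts = ((k, v) :: ts1) ++ (k', v') :: ts2 := by
            rw [hts]; rfl
          rw [hcons]
          refine scanW_match ((k, v) :: ts1) ts2 k' v' r hk'ne ?_
          intro p hp
          rcases List.mem_cons.mp hp with heq | h
          · rw [heq, hr]
            exact hHead
          · exact hts1 r p h
        rw [hrep, scanW_skip ts u _ hblk, hmatchL, ih r hrlen, hs_eq,
          scanW_skip ((k, v) :: ts) u (k' ++ r) (fun j hj p hp hc => by
            rw [hr, ← hdropj j (by omega)] at hc
            exact hmin j (by omega) p hp hc),
          hmatchR]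
    · -- no key matches anywhere: both sides are the identity
      push Not at hA
      have hrep : rep1 k v s = s := by
        have := rep1_skip k v s [] (fun j hj hc => by
          simp only [List.append_nil] at hc
          exact hA j (k, v) List.mem_cons_self hc)
        simpa [rep1_nil] using this
      have h1 : scanW ts s = s := by
        have := scanW_skip ts s [] (fun j hj p hp hc => by
          simp only [List.append_nil] at hc
          exact hA j p (List.mem_cons_of_mem _ hp) hc)
        simpa [scanW_nil] using this
      have h2 : scanW ((k, v) :: ts) s = s := by
        have := scanW_skip ((k, v) :: ts) s [] (fun j hj p hp hc => by
          simp only [List.append_nil] at hc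
          exact hA j p hp hc)
        simpa [scanW_nil] using this
      rw [hrep, h1, h2]

theorem seqRep_eq_scanW (tt : List (List Char × List Char)) (hg : GoodT tt) (s : List Char) :
    seqRep tt s = scanW tt s := by
  induction tt generalizing s with
  | nil => rw [scanW_nil_table]; rfl
  | cons p ts ih =>
    show seqRep ts (rep1 p.1 p.2 s) = _
    rw [ih (GoodT_cons hg), step p.1 p.2 ts (by exact hg) s]

theorem foldA (l : List (String × String)) (s : String) (h : ∀ p ∈ l, p.1.toList ≠ []) :
    l.foldl (fun pos p => PySem.Str.replace pos p.1 p.2) s =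
      String.ofList (seqRep (l.map fun p => (p.1.toList, p.2.toList)) s.toList) := by
  induction l generalizing s with
  | nil => show s = String.ofList s.toList; simp
  | cons p l ih =>
    show List.foldl _ (PySem.Str.replace s p.1 p.2) l = _
    rw [ih _ (fun q hq => h q (List.mem_cons_of_mem _ hq))]
    congr 1
    show seqRep _ (PySem.Str.replace s p.1 p.2).toList = seqRep _ (rep1 p.1.toList p.2.toList s.toList)
    rw [PySem.Str.replace, replace_eq_rep1 _ _ _ (h p List.mem_cons_self)]
    simp

-- ===== VERDICT (by name: the statement is the Claim_ definition above) =====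
theorem clean_position_spec : Claim_equal_clean_position := by
  intro position _
  show clean_position position = clean_position_alt position
  rw [clean_position, clean_position_alt, cpScan_eq_scanW,
    ← seqRep_eq_scanW cpTableL good_cpTableL]
  exact foldA _ position (by decide)
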